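-- pv_equiv track=rewrite | github.com/SanjayaWeerasinghe/GasGuard | ml-service/app_old_untrained.py | get_highest_risk
-- ===== SOURCE A (Python) =====
-- RISK_HIERARCHY = {
--     "NORMAL": 0,
--     "LOW_ANOMALY": 1,
--     "UNUSUAL": 2,
--     "ALERT": 3,
--     "WARNING": 4,
--     "CRITICAL": 5
-- }
--
-- def get_highest_risk(risk_states):
--     """
--     Get the highest risk state from a list of risk states.
--
--     Args:
--         risk_states: List of risk state strings
--
--     Returns:
--         Highest risk state
--     """
--     if not risk_states:
--         return "NORMAL"
--
--     highest = "NORMAL"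
--     highest_level = 0
--
--     for state in risk_states:
--         if state in RISK_HIERARCHY:
--             level = RISK_HIERARCHY[state]
--             if level > highest_level:
--                 highest_level = level
--                 highest = state
--
--     return highest
-- ===== SOURCE B (Python) =====
-- RISK_HIERARCHY = {
--     "NORMAL": 0,
--     "LOW_ANOMALY": 1,
--     "UNUSUAL": 2,
--     "ALERT": 3,
--     "WARNING": 4,
--     "CRITICAL": 5
-- }
--
-- def get_highest_risk(risk_states):
--     present = set(risk_states)
--     for name in ("CRITICAL", "WARNING", "ALERT", "UNUSUAL", "LOW_ANOMALY"):
--         if name in present: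
--             return name
--     return "NORMAL"
-- ===== Notes on version B (the rewrite author's own statement) =====
-- stated objective: simpler
-- what changed: B does not scan the input for a running maximum: it builds a set of the input once and walks the fixed hierarchy names in descending severity, returning the first one present (and 'NORMAL' if none is).
import Mathlib
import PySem

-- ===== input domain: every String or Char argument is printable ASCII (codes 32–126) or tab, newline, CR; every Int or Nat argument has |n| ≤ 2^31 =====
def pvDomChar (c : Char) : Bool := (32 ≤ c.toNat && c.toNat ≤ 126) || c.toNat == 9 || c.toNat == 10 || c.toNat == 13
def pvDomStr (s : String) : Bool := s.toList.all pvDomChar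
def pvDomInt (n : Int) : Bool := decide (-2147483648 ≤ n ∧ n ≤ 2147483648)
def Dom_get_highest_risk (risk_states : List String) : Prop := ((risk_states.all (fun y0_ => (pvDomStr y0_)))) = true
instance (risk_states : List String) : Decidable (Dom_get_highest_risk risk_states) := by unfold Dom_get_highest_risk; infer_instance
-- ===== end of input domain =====

-- B walks the fixed hierarchy names in descending severity and returns the first one present in a set of the input, instead of threading a running maximum through the input; objective: simpler (return value unchanged).


-- ===== PORT A =====
-- RISK_HIERARCHY lookup: some level if the state is a key of the dict, none otherwise
def riskLevel? (s : String) : Option Int :=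
  if s = "NORMAL" then some 0
  else if s = "LOW_ANOMALY" then some 1
  else if s = "UNUSUAL" then some 2
  else if s = "ALERT" then some 3
  else if s = "WARNING" then some 4
  else if s = "CRITICAL" then some 5
  else none

-- the for-loop of A, threading (highest, highest_level)
def goA : List String → String → Int → String
  | [], highest, _ => highest
  | state :: rest, highest, highest_level =>
    match riskLevel? state with
    | none => goA rest highest highest_level
    | some level =>
      if level > highest_level then goA rest state level
      else goA rest highest highest_level

def get_highest_risk (risk_states : List String) : String :=
  if risk_states = [] then "NORMAL"
  else goA risk_states "NORMAL" 0

-- ===== PORT B =====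
-- present = set(risk_states); then the fixed descending chain of membership tests
def get_highest_risk_alt (risk_states : List String) : String :=
  let present : PySem.Set String := PySem.Set.ofList risk_states
  if PySem.Set.contains present "CRITICAL" then "CRITICAL"
  else if PySem.Set.contains present "WARNING" then "WARNING"
  else if PySem.Set.contains present "ALERT" then "ALERT"
  else if PySem.Set.contains present "UNUSUAL" then "UNUSUAL"
  else if PySem.Set.contains present "LOW_ANOMALY" then "LOW_ANOMALY"
  else "NORMAL"

-- ===== PRECONDITION & SPEC =====
def Spec_get_highest_risk (risk_states : List String) (out : String) : Prop := out = get_highest_risk_alt risk_states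
instance (risk_states : List String) (out : String) : Decidable (Spec_get_highest_risk risk_states out) := by unfold Spec_get_highest_risk; infer_instance

-- ===== CLAIM (what is proved, stated in full; the proofs are below) =====
def Claim_equal_get_highest_risk : Prop := ∀ (risk_states : List String), Dom_get_highest_risk risk_states → Spec_get_highest_risk risk_states (get_highest_risk risk_states)

-- ===== LEMMAS AND PROOFS =====

-- the name of a level (only used in proofs, to characterise A's loop)
def riskName (l : Int) : String :=
  if l = 1 then "LOW_ANOMALY"
  else if l = 2 then "UNUSUAL"
  else if l = 3 then "ALERT"
  else if l = 4 then "WARNING"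
  else if l = 5 then "CRITICAL"
  else "NORMAL"

lemma riskLevel?_name {s : String} {l : Int} (h : riskLevel? s = some l) :
    riskName l = s ∧ 0 ≤ l ∧ l ≤ 5 := by
  unfold riskLevel? at h
  split_ifs at h <;> simp_all <;> subst_vars <;> simp [riskName]

lemma goA_invariant : ∀ (l : List String) (m : Int), 0 ≤ m →
    goA l (riskName m) m = riskName ((l.filterMap riskLevel?).foldl max m) := by
  intro l
  induction l with
  | nil => intro m _; simp [goA]
  | cons s rest ih =>
    intro m hm
    simp only [goA, List.filterMap_cons]
    cases hlv : riskLevel? s with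
    | none => simpa using ih m hm
    | some lv =>
      obtain ⟨hname, hpos, _⟩ := riskLevel?_name hlv
      by_cases hgt : lv > m
      · simp only [if_pos hgt, List.foldl_cons]
        rw [show max m lv = lv by omega, ← hname]
        exact ih lv hpos
      · simp only [if_neg hgt, List.foldl_cons]
        rw [show max m lv = m by omega]
        exact ih m hm

lemma foldl_max_le {l : List Int} {a k : Int} (ha : a ≤ k) (h : ∀ x ∈ l, x ≤ k) :
    l.foldl max a ≤ k := by
  induction l generalizing a with
  | nil => exact ha
  | cons x xs ih =>
    exact ih (by have := h x (by simp); omega) (fun y hy => h y (by simp [hy]))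

lemma init_le_foldl_max : ∀ (l : List Int) (a : Int), a ≤ l.foldl max a := by
  intro l
  induction l with
  | nil => simp
  | cons x xs ih => intro a; exact le_trans (le_max_left a x) (ih (max a x))

lemma le_foldl_max_of_mem {l : List Int} {a x : Int} (hx : x ∈ l) :
    x ≤ l.foldl max a := by
  induction l generalizing a with
  | nil => cases hx
  | cons y ys ih =>
    rcases List.mem_cons.mp hx with h | h
    · subst h
      exact le_trans (le_max_right a x) (init_le_foldl_max ys (max a x))
    · exact ih h

-- maximum level of the input list
def maxLvl (xs : List String) : Int := (xs.filterMap riskLevel?).foldl max 0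

lemma maxLvl_ge {xs : List String} {s : String} {l : Int}
    (hs : s ∈ xs) (hl : riskLevel? s = some l) : l ≤ maxLvl xs :=
  le_foldl_max_of_mem (List.mem_filterMap.mpr ⟨s, hs, hl⟩)

lemma maxLvl_le {xs : List String} {k : Int} (hk : 0 ≤ k)
    (h : ∀ s ∈ xs, ∀ l, riskLevel? s = some l → l ≤ k) : maxLvl xs ≤ k := by
  refine foldl_max_le hk ?_
  intro x hx
  obtain ⟨s, hs, hsl⟩ := List.mem_filterMap.mp hx
  exact h s hs x hsl

-- if l = riskLevel? s exceeds a threshold, s is one of the high names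
lemma riskLevel?_inv {s : String} {l : Int} (h : riskLevel? s = some l) :
    (l = 5 → s = "CRITICAL") ∧ (l = 4 → s = "WARNING") ∧ (l = 3 → s = "ALERT") ∧
    (l = 2 → s = "UNUSUAL") ∧ (l = 1 → s = "LOW_ANOMALY") := by
  unfold riskLevel? at h
  split_ifs at h <;> simp_all <;> omega

lemma contains_ofList_iff {xs : List String} {x : String} :
    PySem.Set.contains (PySem.Set.ofList xs) x = true ↔ x ∈ xs := by
  simp [PySem.Set.mem_ofList]

-- ===== VERDICT (by name: the statement is the Claim_ definition above) =====
theorem get_highest_risk_spec : Claim_equal_get_highest_risk := by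
  intro xs _
  unfold Spec_get_highest_risk get_highest_risk get_highest_risk_alt
  have hA : (if xs = [] then "NORMAL" else goA xs "NORMAL" 0) = riskName (maxLvl xs) := by
    by_cases hnil : xs = []
    · subst hnil; simp [maxLvl, riskName]
    · rw [if_neg hnil]
      have h := goA_invariant xs 0 le_rfl
      rwa [show riskName 0 = "NORMAL" from rfl] at h
  rw [hA]
  by_cases h5 : "CRITICAL" ∈ xs
  · rw [if_pos (contains_ofList_iff.mpr h5)]
    have hge : (5 : Int) ≤ maxLvl xs := maxLvl_ge h5 rfl
    have hle : maxLvl xs ≤ 5 := maxLvl_le (by norm_num)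
      (fun s _ l hl => (riskLevel?_name hl).2.2)
    have : maxLvl xs = 5 := le_antisymm hle hge
    rw [this]; rfl
  · rw [if_neg (fun hc => h5 (contains_ofList_iff.mp hc))]
    have hub5 : maxLvl xs ≤ 4 := maxLvl_le (by norm_num) (fun s hs l hl => by
      have hb := (riskLevel?_name hl).2.2
      rcases eq_or_lt_of_le hb with he | _
      · exact absurd ((riskLevel?_inv hl).1 he ▸ hs) h5
      · omega)
    by_cases h4 : "WARNING" ∈ xs
    · rw [if_pos (contains_ofList_iff.mpr h4)]
      have hge : (4 : Int) ≤ maxLvl xs := maxLvl_ge h4 rfl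
      rw [show maxLvl xs = 4 by omega]; rfl
    · rw [if_neg (fun hc => h4 (contains_ofList_iff.mp hc))]
      have hub4 : maxLvl xs ≤ 3 := maxLvl_le (by norm_num) (fun s hs l hl => by
        have hb := (riskLevel?_name hl).2.2
        have hml := maxLvl_ge hs hl
        have hinv := riskLevel?_inv hl
        by_cases hl5 : l = 5
        · exact absurd (hinv.1 hl5 ▸ hs) h5
        · by_cases hl4 : l = 4
          · exact absurd (hinv.2.1 hl4 ▸ hs) h4
          · omega)
      by_cases h3 : "ALERT" ∈ xs
      · rw [if_pos (contains_ofList_iff.mpr h3)]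
        have hge : (3 : Int) ≤ maxLvl xs := maxLvl_ge h3 rfl
        rw [show maxLvl xs = 3 by omega]; rfl
      · rw [if_neg (fun hc => h3 (contains_ofList_iff.mp hc))]
        have hub3 : maxLvl xs ≤ 2 := maxLvl_le (by norm_num) (fun s hs l hl => by
          have hb := (riskLevel?_name hl).2.2
          have hinv := riskLevel?_inv hl
          by_cases hl5 : l = 5
          · exact absurd (hinv.1 hl5 ▸ hs) h5
          · by_cases hl4 : l = 4
            · exact absurd (hinv.2.1 hl4 ▸ hs) h4
            · by_cases hl3 : l = 3
              · exact absurd (hinv.2.2.1 hl3 ▸ hs) h3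
              · omega)
        by_cases h2 : "UNUSUAL" ∈ xs
        · rw [if_pos (contains_ofList_iff.mpr h2)]
          have hge : (2 : Int) ≤ maxLvl xs := maxLvl_ge h2 rfl
          rw [show maxLvl xs = 2 by omega]; rfl
        · rw [if_neg (fun hc => h2 (contains_ofList_iff.mp hc))]
          have hub2 : maxLvl xs ≤ 1 := maxLvl_le (by norm_num) (fun s hs l hl => by
            have hb := (riskLevel?_name hl).2.2
            have hinv := riskLevel?_inv hl
            by_cases hl5 : l = 5
            · exact absurd (hinv.1 hl5 ▸ hs) h5
            · by_cases hl4 : l = 4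
              · exact absurd (hinv.2.1 hl4 ▸ hs) h4
              · by_cases hl3 : l = 3
                · exact absurd (hinv.2.2.1 hl3 ▸ hs) h3
                · by_cases hl2 : l = 2
                  · exact absurd (hinv.2.2.2.1 hl2 ▸ hs) h2
                  · omega)
          by_cases h1 : "LOW_ANOMALY" ∈ xs
          · rw [if_pos (contains_ofList_iff.mpr h1)]
            have hge : (1 : Int) ≤ maxLvl xs := maxLvl_ge h1 rfl
            rw [show maxLvl xs = 1 by omega]; rfl
          · rw [if_neg (fun hc => h1 (contains_ofList_iff.mp hc))]
            have hub1 : maxLvl xs ≤ 0 := maxLvl_le (by norm_num) (fun s hs l hl => by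
              have hb := (riskLevel?_name hl).2.2
              have hinv := riskLevel?_inv hl
              by_cases hl5 : l = 5
              · exact absurd (hinv.1 hl5 ▸ hs) h5
              · by_cases hl4 : l = 4
                · exact absurd (hinv.2.1 hl4 ▸ hs) h4
                · by_cases hl3 : l = 3
                  · exact absurd (hinv.2.2.1 hl3 ▸ hs) h3
                  · by_cases hl2 : l = 2
                    · exact absurd (hinv.2.2.2.1 hl2 ▸ hs) h2
                    · by_cases hl1 : l = 1
                      · exact absurd (hinv.2.2.2.2 hl1 ▸ hs) h1
                      · have := (riskLevel?_name hl).2.1; omega)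
            have hlb : (0 : Int) ≤ maxLvl xs := init_le_foldl_max _ 0
            rw [show maxLvl xs = 0 by omega]; rfl
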